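-- pv_equiv track=rewrite | github.com/tquintard/AoC_2024 | modules/pipe_maze/__init__.py | fill_grid_find_start
-- ===== SOURCE A (Python) =====
-- def fill_grid_find_start(grid: list, fl_grid: list) -> list:
--
--     for y, row in enumerate(grid):
--         fl_grid.append([])
--         for x, _ in enumerate(row):
--             fl_grid[y].append(False)
--             if grid[y][x] == 'S':
--                 x_start, y_start = x, y
--     return x_start, y_start
-- ===== SOURCE B (Python) =====
-- def fill_grid_find_start(grid: list, fl_grid: list) -> list:
--     # Build the whole boolean grid in one shot (mutating fl_grid in place),
--     # then locate the last 'S' by scanning backwards and stopping at the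
--     # first hit.
--     fl_grid.extend([[False] * len(row) for row in grid])
--     for y in range(len(grid) - 1, -1, -1):
--         row = grid[y]
--         for x in range(len(row) - 1, -1, -1):
--             if row[x] == 'S':
--                 return x, y
-- ===== Notes on version B (the rewrite author's own statement) =====
-- stated objective: alternative
-- what changed: A interleaves building the boolean grid with a full forward scan that keeps overwriting the start coordinates; B builds the whole boolean grid with one extend of a comprehension and then finds the last 'S' by a backward scan that returns at the first hit.
import Mathlib
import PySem

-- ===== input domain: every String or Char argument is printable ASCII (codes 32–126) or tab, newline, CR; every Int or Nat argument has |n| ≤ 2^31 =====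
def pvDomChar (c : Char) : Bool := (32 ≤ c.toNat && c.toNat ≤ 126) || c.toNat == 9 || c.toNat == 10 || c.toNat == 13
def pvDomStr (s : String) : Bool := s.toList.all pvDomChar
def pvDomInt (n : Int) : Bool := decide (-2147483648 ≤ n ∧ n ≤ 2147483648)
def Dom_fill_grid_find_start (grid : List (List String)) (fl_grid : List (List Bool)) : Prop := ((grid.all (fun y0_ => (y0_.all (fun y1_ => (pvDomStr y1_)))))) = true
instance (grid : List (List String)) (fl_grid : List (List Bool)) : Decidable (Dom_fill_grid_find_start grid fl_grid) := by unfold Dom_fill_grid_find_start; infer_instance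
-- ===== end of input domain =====

-- B builds the boolean grid with one extend and then scans backwards for the last 'S',
-- returning at the first hit; equivalence is about the RETURN value only (both mutate
-- fl_grid in Python, A by per-cell appends, B by one extend).


-- ===== PORT A =====
-- State = (fl_grid being built, last-seen 'S' position).  grid[y][x] is ported with
-- pyGetD (indices from enumerate are always in range, so the default is never used);
-- fl_grid.append/[y].append are ported with ++ / pySetD on the state, exactly as in A.
def fill_grid_find_start (grid : List (List String)) (fl_grid : List (List Bool)) : Int × Int :=
  let st := (PySem.List.enumerate grid).foldl
    (fun (st : List (List Bool) × Option (Int × Int)) yr =>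
      (PySem.List.enumerate yr.2).foldl
        (fun (st2 : List (List Bool) × Option (Int × Int)) xc =>
          (PySem.List.pySetD st2.1 yr.1 (PySem.List.pyGetD st2.1 yr.1 [] ++ [false]),
           if PySem.List.pyGetD (PySem.List.pyGetD grid yr.1 []) xc.1 "" = "S"
           then some (xc.1, yr.1) else st2.2))
        (st.1 ++ [[]], st.2))
    (fl_grid, none)
  match st.2 with
  | some p => p
  | none => (0, 0)   -- Python raises UnboundLocalError here; excluded by Pre_

-- ===== PORT B =====
-- reversed row scan: first 'S' from the right
def findRowRev : List (Int × String) → Option Int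
  | [] => none
  | (x, c) :: rest => if c = "S" then some x else findRowRev rest

-- reversed grid scan: first row (from the bottom) containing an 'S'
def findGridRev : List (Int × List String) → Option (Int × Int)
  | [] => none
  | (y, row) :: rest =>
      match findRowRev (PySem.List.enumerate row).reverse with
      | some x => some (x, y)
      | none => findGridRev rest

def fill_grid_find_start_alt (grid : List (List String)) (fl_grid : List (List Bool)) : Int × Int :=
  let _fl := fl_grid ++ grid.map (fun row => row.map (fun _ => false))
  match findGridRev (PySem.List.enumerate grid).reverse with
  | some p => p
  | none => (0, 0)   -- Python B returns None here; excluded by Pre_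

-- ===== PRECONDITION & SPEC =====
-- Pre_ excludes grids with no 'S' cell: there Python A raises UnboundLocalError.
def Pre_fill_grid_find_start (grid : List (List String)) (fl_grid : List (List Bool)) : Prop :=
  ∃ row ∈ grid, "S" ∈ row
instance (grid : List (List String)) (fl_grid : List (List Bool)) : Decidable (Pre_fill_grid_find_start grid fl_grid) := by unfold Pre_fill_grid_find_start; infer_instance
def pvWitness_fill_grid_find_start : List (List String) × List (List Bool) := ([[".", "S"], ["."]], [])

def Spec_fill_grid_find_start (grid : List (List String)) (fl_grid : List (List Bool)) (out : Int × Int) : Prop := out = fill_grid_find_start_alt grid fl_grid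
instance (grid : List (List String)) (fl_grid : List (List Bool)) (out : Int × Int) : Decidable (Spec_fill_grid_find_start grid fl_grid out) := by unfold Spec_fill_grid_find_start; infer_instance

-- ===== CLAIM (what is proved, stated in full; the proofs are below) =====
def Claim_equal_fill_grid_find_start : Prop := ∀ (grid : List (List String)) (fl_grid : List (List Bool)), Dom_fill_grid_find_start grid fl_grid → Pre_fill_grid_find_start grid fl_grid → Spec_fill_grid_find_start grid fl_grid (fill_grid_find_start grid fl_grid)

-- ===== LEMMAS AND PROOFS =====

-- generic "first some" search, the shape of B's backward scans
def firstSome {α β : Type} (h : α → Option β) : List α → Option β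
  | [] => none
  | a :: t => match h a with
      | some b => some b
      | none => firstSome h t

-- 'o if it is some, else the fallback s' — the step shape of A's overwriting loop
def orD {β : Type} (o : Option β) (s : Option β) : Option β :=
  match o with
  | some b => some b
  | none => s

theorem firstSome_append {α β : Type} (h : α → Option β) (u v : List α) :
    firstSome h (u ++ v) = orD (firstSome h u) (firstSome h v) := by
  induction u with
  | nil => simp [firstSome, orD]
  | cons a t ih => simp only [List.cons_append, firstSome]; cases h a <;> simp [orD, ih]

theorem firstSome_map {α β γ : Type} (g : α → Option β) (m : β → γ) (l : List α) :
    firstSome (fun a => (g a).map m) l = (firstSome g l).map m := by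
  induction l with
  | nil => rfl
  | cons a t ih => simp only [firstSome]; cases g a <;> simp [ih]

-- a fold that overwrites an optional accumulator equals the backward first-hit search
theorem foldl_orD_eq_firstSome_reverse {α β : Type} (h : α → Option β) (l : List α)
    (s0 : Option β) :
    l.foldl (fun s a => orD (h a) s) s0 = orD (firstSome h l.reverse) s0 := by
  induction l generalizing s0 with
  | nil => rfl
  | cons a t ih =>
      simp only [List.foldl_cons, List.reverse_cons, firstSome_append, ih, firstSome]
      cases firstSome h t.reverse <;> cases h a <;> rfl

-- the snd component of a pair-state fold whose snd-update ignores the fst component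
theorem snd_foldl_pair {α σ τ : Type} (l : List α) (F : σ × τ → α → σ) (G : τ → α → τ)
    (i : σ × τ) :
    (l.foldl (fun st a => (F st a, G st.2 a)) i).2 = l.foldl G i.2 := by
  induction l generalizing i with
  | nil => rfl
  | cons a t ih => simp [List.foldl_cons, ih]

-- the snd projection of A's nested pair-state fold
theorem snd_nested {γ δ σ τ : Type} (l : List γ) (inner : γ → List δ)
    (F2 : γ → (σ × τ) → δ → σ) (G2 : γ → τ → δ → τ) (F1 : σ → γ → σ) (i : σ × τ) :
    (l.foldl (fun st yr => (inner yr).foldl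
        (fun st2 xc => (F2 yr st2 xc, G2 yr st2.2 xc)) (F1 st.1 yr, st.2)) i).2
      = l.foldl (fun s yr => (inner yr).foldl (fun s2 xc => G2 yr s2 xc) s) i.2 := by
  induction l generalizing i with
  | nil => rfl
  | cons a t ih =>
      simp only [List.foldl_cons, ih]
      rw [snd_foldl_pair (inner a) (fun st2 xc => F2 a st2 xc) (G2 a) (F1 i.1 a, i.2)]

theorem pyGetD_enumerate_mem {α : Type} [Inhabited α] (l : List α) (d : α) (p : Int × α)
    (hp : p ∈ PySem.List.enumerate l) : PySem.List.pyGetD l p.1 d = p.2 := by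
  rw [PySem.List.mem_enumerate_iff] at hp
  obtain ⟨k, hk, rfl⟩ := hp
  simp [PySem.List.pyGetD_natCast, List.getD_eq_getElem?_getD, List.getElem?_eq_getElem hk]

-- A's inner loop (after the lookups are simplified) is a backward row search
theorem foldl_row_eq_firstSome (y : Int) (l : List (Int × String)) (s0 : Option (Int × Int)) :
    l.foldl (fun s xc => if xc.2 = "S" then some (xc.1, y) else s) s0
      = orD (firstSome (fun xc : Int × String =>
          if xc.2 = "S" then some (xc.1, y) else none) l.reverse) s0 := by
  have h : (fun (s : Option (Int × Int)) (xc : Int × String) =>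
        if xc.2 = "S" then some (xc.1, y) else s)
      = (fun s xc => orD (if xc.2 = "S" then some (xc.1, y) else none) s) := by
    funext s xc; by_cases h : xc.2 = "S" <;> simp [h, orD]
  rw [h, foldl_orD_eq_firstSome_reverse]

-- B's hand-written searches are instances of firstSome
theorem findRowRev_eq_firstSome (l : List (Int × String)) :
    findRowRev l = firstSome (fun xc : Int × String => if xc.2 = "S" then some xc.1 else none) l := by
  induction l with
  | nil => rfl
  | cons a t ih =>
      obtain ⟨x, c⟩ := a
      simp only [findRowRev, firstSome]
      by_cases h : c = "S" <;> simp [h, ih]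

theorem findGridRev_eq_firstSome (l : List (Int × List String)) :
    findGridRev l = firstSome
      (fun yr : Int × List String =>
        (firstSome (fun xc : Int × String => if xc.2 = "S" then some xc.1 else none)
          (PySem.List.enumerate yr.2).reverse).map (fun x => (x, yr.1))) l := by
  induction l with
  | nil => rfl
  | cons a t ih =>
      obtain ⟨y, row⟩ := a
      simp only [findGridRev, firstSome, findRowRev_eq_firstSome]
      cases firstSome (fun xc : Int × String => if xc.2 = "S" then some xc.1 else none)
          (PySem.List.enumerate row).reverse <;> simp [ih]

-- the two ports compute the same pair
theorem ports_eq (grid : List (List String)) (fl_grid : List (List Bool)) :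
    fill_grid_find_start grid fl_grid = fill_grid_find_start_alt grid fl_grid := by
  unfold fill_grid_find_start fill_grid_find_start_alt
  show (match ((PySem.List.enumerate grid).foldl
      (fun (st : List (List Bool) × Option (Int × Int)) yr =>
        (PySem.List.enumerate yr.2).foldl
          (fun (st2 : List (List Bool) × Option (Int × Int)) xc =>
            (PySem.List.pySetD st2.1 yr.1 (PySem.List.pyGetD st2.1 yr.1 [] ++ [false]),
             if PySem.List.pyGetD (PySem.List.pyGetD grid yr.1 []) xc.1 "" = "S"
             then some (xc.1, yr.1) else st2.2))
          (st.1 ++ [[]], st.2))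
      (fl_grid, none)).2 with
    | some p => p
    | none => ((0 : Int), (0 : Int)))
    = (match findGridRev (PySem.List.enumerate grid).reverse with
      | some p => p
      | none => ((0 : Int), (0 : Int)))
  rw [findGridRev_eq_firstSome]
  rw [snd_nested (PySem.List.enumerate grid) (fun yr => PySem.List.enumerate yr.2)
    (fun yr st2 xc => PySem.List.pySetD st2.1 yr.1 (PySem.List.pyGetD st2.1 yr.1 [] ++ [false]))
    (fun yr s2 xc => if PySem.List.pyGetD (PySem.List.pyGetD grid yr.1 []) xc.1 "" = "S"
        then some (xc.1, yr.1) else s2)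
    (fun s _ => s ++ [[]]) (fl_grid, none)]
  -- replace the pyGetD lookups by the enumerated elements
  have hcongr : (PySem.List.enumerate grid).foldl
      (fun (s : Option (Int × Int)) yr =>
        (PySem.List.enumerate yr.2).foldl
          (fun s2 (xc : Int × String) =>
            if PySem.List.pyGetD (PySem.List.pyGetD grid yr.1 []) xc.1 "" = "S"
            then some (xc.1, yr.1) else s2) s)
      none
    = (PySem.List.enumerate grid).foldl
      (fun (s : Option (Int × Int)) yr =>
        (PySem.List.enumerate yr.2).foldl
          (fun s2 (xc : Int × String) => if xc.2 = "S" then some (xc.1, yr.1) else s2) s)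
      none := by
    refine PySem.List.foldl_congr_mem _ _ _ _ (fun s yr hyr => ?_)
    refine PySem.List.foldl_congr_mem _ _ _ _ (fun s2 xc hxc => ?_)
    rw [pyGetD_enumerate_mem grid [] yr hyr, pyGetD_enumerate_mem yr.2 "" xc hxc]
  rw [show ((fl_grid, (none : Option (Int × Int))).2) = (none : Option (Int × Int)) from rfl,
    hcongr]
  -- inner folds are backward searches
  have hinner : (fun (s : Option (Int × Int)) (yr : Int × List String) =>
      (PySem.List.enumerate yr.2).foldl
        (fun s2 (xc : Int × String) => if xc.2 = "S" then some (xc.1, yr.1) else s2) s)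
      = (fun s yr => orD (firstSome
            (fun xc : Int × String => if xc.2 = "S" then some (xc.1, yr.1) else none)
            (PySem.List.enumerate yr.2).reverse) s) := by
    funext s yr
    exact foldl_row_eq_firstSome yr.1 (PySem.List.enumerate yr.2) s
  rw [hinner, foldl_orD_eq_firstSome_reverse]
  -- and the two search functions agree
  have hfun : (fun yr : Int × List String => firstSome
        (fun xc : Int × String => if xc.2 = "S" then some (xc.1, yr.1) else none)
        (PySem.List.enumerate yr.2).reverse)
      = (fun yr : Int × List String =>
        (firstSome (fun xc : Int × String => if xc.2 = "S" then some xc.1 else none)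
          (PySem.List.enumerate yr.2).reverse).map (fun x => (x, yr.1))) := by
    funext yr
    rw [← firstSome_map]
    congr 1
    funext xc
    by_cases h : xc.2 = "S" <;> simp [h]
  rw [hfun]
  cases firstSome (fun yr : Int × List String =>
      (firstSome (fun xc : Int × String => if xc.2 = "S" then some xc.1 else none)
        (PySem.List.enumerate yr.2).reverse).map (fun x => (x, yr.1)))
    (PySem.List.enumerate grid).reverse <;> rfl

-- ===== VERDICT (by name: the statement is the Claim_ definition above) =====
theorem fill_grid_find_start_spec : Claim_equal_fill_grid_find_start := by
  intro grid fl_grid _ _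
  unfold Spec_fill_grid_find_start
  exact ports_eq grid fl_grid
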